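-- pv_equiv track=rewrite | github.com/gooodforeal/pandas_realisation | Ultimate/funcs.py | generate_line
-- ===== SOURCE A (Python) =====
-- def generate_line(line_size, max_len):
--     res = ""
--     for i in range(line_size):
--         if i % (max_len + 2) == 0:
--             res += "+"
--         else:
--             res += "-"
--     res += "\n"
--     return res
-- ===== SOURCE B (Python) =====
-- def generate_line(line_size, max_len):
--     if line_size <= 0:
--         return "\n"
--     chars = ["-"] * line_size
--     for i in range(0, line_size, max_len + 2):
--         chars[i] = "+"
--     return "".join(chars) + "\n"
-- ===== Notes on version B (the rewrite author's own statement) =====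
-- stated objective: faster
-- what changed: Replaces the per-character loop with a '%' test by pre-filling a dash buffer and stamping '+' only at the stepped positions range(0, line_size, max_len+2), then joining once; Pre_ restricts to the natural domain of a nonnegative cell width (max_len >= -1) whenever line_size > 0, because for smaller max_len A crashes (max_len = -2) or its plus placement at multiples of |max_len+2| is an artefact of Python's modulo on a negative divisor.
-- outside the precondition, e.g. on generate_line(5, -4): A returns '+-+-+\n', B returns '-----\n'
import Mathlib
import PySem

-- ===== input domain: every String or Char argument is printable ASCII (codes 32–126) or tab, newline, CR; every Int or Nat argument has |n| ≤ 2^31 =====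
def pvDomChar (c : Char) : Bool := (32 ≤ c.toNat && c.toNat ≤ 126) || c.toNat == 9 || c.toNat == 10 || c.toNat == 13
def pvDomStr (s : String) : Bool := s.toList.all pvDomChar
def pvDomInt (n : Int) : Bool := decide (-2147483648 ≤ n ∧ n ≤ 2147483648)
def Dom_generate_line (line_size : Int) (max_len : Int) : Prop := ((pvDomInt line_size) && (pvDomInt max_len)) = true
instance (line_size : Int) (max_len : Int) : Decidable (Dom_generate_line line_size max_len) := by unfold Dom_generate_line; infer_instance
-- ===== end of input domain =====

-- B replaces A's per-index loop with a '%' test by pre-filling a dash buffer and stamping '+' at the stepped positions (constant-factor speedup measured in Python).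

-- ===== PORT A =====
def generate_line (line_size : Int) (max_len : Int) : String :=
  let res : List Char := (PySem.List.pyRange 0 line_size 1).foldl
    (fun res i => if PySem.Int.mod i (max_len + 2) = 0 then res ++ ['+'] else res ++ ['-']) []
  String.ofList (res ++ ['\n'])

-- ===== PORT B =====
def generate_line_alt (line_size : Int) (max_len : Int) : String :=
  if line_size ≤ 0 then String.ofList ['\n']
  else
    let chars : List Char := List.replicate line_size.toNat '-'
    let chars := (PySem.List.pyRange 0 line_size (max_len + 2)).foldl
      (fun cs i => cs.set i.toNat '+') chars
    String.ofList (chars ++ ['\n'])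

-- ===== PRECONDITION & SPEC =====
-- Pre_ restricts to the natural domain of a nonempty cell width (max_len ≥ -1) whenever something is
-- built (line_size > 0): for max_len ≤ -2 A raises ZeroDivisionError (max_len = -2) or places pluses
-- at multiples of |max_len + 2|, an artefact of Python's modulo on a negative divisor.
def Pre_generate_line (line_size : Int) (max_len : Int) : Prop := line_size ≤ 0 ∨ -1 ≤ max_len
instance (line_size : Int) (max_len : Int) : Decidable (Pre_generate_line line_size max_len) := by unfold Pre_generate_line; infer_instance
def pvWitness_generate_line : Int × Int := (10, 1)

def Spec_generate_line (line_size : Int) (max_len : Int) (out : String) : Prop := out = generate_line_alt line_size max_len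
instance (line_size : Int) (max_len : Int) (out : String) : Decidable (Spec_generate_line line_size max_len out) := by unfold Spec_generate_line; infer_instance

-- ===== CLAIM (what is proved, stated in full; the proofs are below) =====
def Claim_equal_generate_line : Prop := ∀ (line_size : Int) (max_len : Int), Dom_generate_line line_size max_len → Pre_generate_line line_size max_len → Spec_generate_line line_size max_len (generate_line line_size max_len)

-- ===== LEMMAS AND PROOFS =====

-- A's loop as a map over the index range
lemma gl_foldl_map (d : Int) (l : List Int) (s : List Char) :
    l.foldl (fun res i => if PySem.Int.mod i d = 0 then res ++ ['+'] else res ++ ['-']) s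
      = s ++ l.map (fun i => if PySem.Int.mod i d = 0 then '+' else '-') := by
  induction l generalizing s with
  | nil => simp
  | cons x xs ih => simp [List.foldl_cons, ih]; split_ifs <;> simp

-- stamping '+' at a list of positions preserves the length
lemma gl_length_stamp (l : List Nat) (cs : List Char) :
    (List.foldl (fun cs i => cs.set i '+') cs l).length = cs.length := by
  induction l generalizing cs with
  | nil => rfl
  | cons x xs ih => simp [List.foldl_cons, ih]

-- the j-th character after stamping: '+' iff j was stamped
lemma gl_stamp_getD (l : List Nat) (cs : List Char) (j : Nat) (d : Char) (hj : j < cs.length) :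
    (List.foldl (fun cs i => cs.set i '+') cs l).getD j d = if j ∈ l then '+' else cs.getD j d := by
  induction l generalizing cs with
  | nil => simp
  | cons x xs ih =>
    rw [List.foldl_cons, ih (cs.set x '+') (by simpa using hj)]
    by_cases hx : j ∈ xs
    · simp [hx]
    · simp only [hx, if_false, List.mem_cons, or_false]
      rcases eq_or_ne x j with rfl | hne
      · simp [List.getD, hj]
      · simp [List.getD, hne, Ne.symm hne]

-- ===== VERDICT (by name: the statement is the Claim_ definition above) =====
theorem generate_line_spec : Claim_equal_generate_line := by
  intro n m _ hpre
  unfold Spec_generate_line generate_line generate_line_alt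
  by_cases hn : n ≤ 0
  · have hr : PySem.List.pyRange 0 n 1 = [] := by
      rw [PySem.List.pyRange_one, show (n - 0).toNat = 0 by omega]
      simp
    rw [if_pos hn, hr]
    simp
  · push Not at hn
    rw [if_neg (by omega)]
    have hm : -1 ≤ m := by rcases hpre with h | h <;> omega
    set p : Int := m + 2 with hp_def
    have hp : 0 < p := by omega
    set P : Nat := p.toNat with hP_def
    have hPp : (P : Int) = p := Int.toNat_of_nonneg hp.le
    have hP : 0 < P := by omega
    set N : Nat := n.toNat with hN_def
    have hNn : (N : Int) = n := Int.toNat_of_nonneg hn.le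
    -- A side: the loop is a map over the index range
    rw [PySem.List.pyRange_one, gl_foldl_map, List.nil_append, List.map_map,
      show ((n:Int) - 0) = n by ring]
    dsimp only
    -- B side: the stamping fold over Int positions is a fold over their Nat images
    have hfold : List.foldl (fun cs i => cs.set i.toNat '+') (List.replicate N '-')
          (PySem.List.pyRange 0 n p)
        = List.foldl (fun cs i => cs.set i '+') (List.replicate N '-')
          ((PySem.List.pyRange 0 n p).map Int.toNat) := by
      rw [List.foldl_map]
    -- the stamped buffer, character by character
    have hmem : ∀ j : Nat, j < N →
        (j ∈ (PySem.List.pyRange 0 n p).map Int.toNat ↔ P ∣ j) := by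
      intro j hjN
      constructor
      · intro hj
        obtain ⟨x, hx, rfl⟩ := List.mem_map.mp hj
        obtain ⟨hx0, -, hdvd⟩ := (PySem.List.mem_pyRange_iff_of_pos hp x).mp hx
        rw [sub_zero] at hdvd
        have hD : (P : Int) ∣ x := hPp ▸ hdvd
        rw [← Int.toNat_of_nonneg hx0, Int.natCast_dvd_natCast] at hD
        exact hD
      · intro hdvd
        refine List.mem_map.mpr ⟨(j : Int), ?_, by simp⟩
        refine (PySem.List.mem_pyRange_iff_of_pos hp _).mpr ⟨by positivity, by omega, ?_⟩
        rw [sub_zero, ← hPp, Int.natCast_dvd_natCast]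
        exact hdvd
    have hstamp : List.foldl (fun cs i => cs.set i '+') (List.replicate N '-')
          ((PySem.List.pyRange 0 n p).map Int.toNat)
        = (List.range N).map (fun k => if k % P = 0 then '+' else '-') := by
      apply List.ext_getElem
      · rw [gl_length_stamp]; simp
      · intro j h1 h2
        have hjN : j < N := by rwa [gl_length_stamp, List.length_replicate] at h1
        rw [← List.getD_eq_getElem _ '-' h1,
          gl_stamp_getD _ _ j '-' (by simpa using hjN),
          List.getElem_map, List.getElem_range]
        by_cases hd : P ∣ j
        · rw [if_pos ((hmem j hjN).mpr hd), if_pos (Nat.mod_eq_zero_of_dvd hd)]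
        · rw [if_neg (fun h => hd ((hmem j hjN).mp h)),
            if_neg (fun h => hd (Nat.dvd_of_mod_eq_zero h))]
          simp [List.getD, hjN]
    rw [hfold, hstamp]
    -- both sides are the same map over the same index range
    congr 1
    congr 1
    apply List.map_congr_left
    intro k hk
    have hiff : (PySem.Int.mod ((0:Int) + (k:Nat)) p = 0) ↔ P ∣ k := by
      rw [zero_add, PySem.Int.mod_eq_zero_iff_dvd, ← hPp, Int.natCast_dvd_natCast]
    simp only [Function.comp_apply, hiff]
    by_cases hd : P ∣ k
    · simp [hd, Nat.mod_eq_zero_of_dvd hd]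
    · rw [if_neg hd, if_neg (fun h => hd (Nat.dvd_of_mod_eq_zero h))]
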